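-- pv_equiv track=rewrite | github.com/VeeraSaiJoshik/AllStateJarvis | TUI/solutions/dp/digit_dp.py | count_digit_sum_eq
-- ===== SOURCE A (Python) =====
-- from functools import lru_cache
--
-- def count_digit_sum_eq(N, k):
--     """
--     Count integers in [1..N] whose digit sum equals k.
--
--     Example:
--         count_digit_sum_eq(100, 5) → 6  (5,14,23,32,41,50)
--         count_digit_sum_eq(999, 10) → 63
--     """
--     s = str(N)
--     n = len(s)
--
--     @lru_cache(maxsize=None)
--     def dp(pos, rem, tight, started):
--         # rem = remaining digit sum needed
--         if rem < 0:
--             return 0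
--         if pos == n:
--             return 1 if (started and rem == 0) else 0
--         limit = int(s[pos]) if tight else 9
--         total = 0
--         for d in range(0, limit + 1):
--             new_started = started or (d > 0)
--             new_rem     = rem - d if new_started else rem
--             if new_rem < 0:
--                 break
--             total += dp(pos + 1, new_rem, tight and (d == limit), new_started)
--         return total
--
--     result = dp(0, k, True, False)
--     dp.cache_clear()
--     return result
-- ===== SOURCE B (Python) =====
-- def count_digit_sum_eq(N, k):
--     """
--     Count integers in [1..N] whose digit sum equals k.
--
--     Combinatorial-table reformulation: precompute ways[i][j] = number of
--     i-digit strings over 0..9 (leading zeros allowed) with digit sum j,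
--     then one left-to-right scan over the digits of N.
--     """
--     digits = [int(c) for c in str(N)]
--     n = len(digits)
--     if k < 0 or k > 9 * n:
--         return 0
--     # ways[i][j] for 0 <= i < n, 0 <= j <= k
--     ways = [[1] + [0] * k]
--     for _ in range(1, n):
--         prev = ways[-1]
--         ways.append([sum(prev[j - d] if d <= j else 0 for d in range(10)) for j in range(k + 1)])
--
--     def w(i, j):
--         return ways[i][j] if 0 <= j <= k else 0
--
--     count = 0
--     # numbers with fewer digits than N (first digit nonzero)
--     for L in range(1, n):
--         for d in range(1, 10):
--             count += w(L - 1, k - d)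
--     # numbers with exactly n digits, smaller than N
--     placed = 0
--     for pos, dig in enumerate(digits):
--         for d in range(1 if pos == 0 else 0, dig):
--             count += w(n - 1 - pos, k - placed - d)
--         placed += dig
--     # N itself (a positive number: digit sum > 0)
--     if placed == k and placed > 0:
--         count += 1
--     return count
-- ===== Notes on version B (the rewrite author's own statement) =====
-- stated objective: alternative
-- what changed: Replaces the memoized top-down digit DP over (pos, rem, tight, started) with a bottom-up combinatorial table ways[i][j] (count of i-digit strings summing to j) plus a single left-to-right scan over the digits of N.
-- outside the precondition, e.g. on count_digit_sum_eq(-1, -1): A returns 0, B raises ValueError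
import Mathlib
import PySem

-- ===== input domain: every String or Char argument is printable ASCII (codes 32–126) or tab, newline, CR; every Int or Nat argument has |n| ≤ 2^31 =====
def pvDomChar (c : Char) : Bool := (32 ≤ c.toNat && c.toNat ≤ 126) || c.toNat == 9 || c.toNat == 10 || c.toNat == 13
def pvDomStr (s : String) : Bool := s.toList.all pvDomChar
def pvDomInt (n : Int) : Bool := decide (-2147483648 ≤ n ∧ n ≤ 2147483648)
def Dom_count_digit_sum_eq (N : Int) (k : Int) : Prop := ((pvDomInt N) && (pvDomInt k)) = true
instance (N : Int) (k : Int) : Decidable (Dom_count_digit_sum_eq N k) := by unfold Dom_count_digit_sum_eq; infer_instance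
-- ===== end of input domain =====

-- B replaces the memoized top-down digit DP with a bottom-up combinatorial table plus one
-- left-to-right scan over the digits of N (alternative algorithm, similar cost).


-- ===== PORT A =====

-- int(c) for a single character c (both Pythons do this on the characters of str(N));
-- `.getD 0` only totalizes: on every input admitted by Pre_ (N ≥ 0) every character of
-- str(N) is a decimal digit, so `int` never raises there.
def pvIntOfChar (c : Char) : Int := (PySem.Int.ofStr? (String.singleton c)).getD 0

-- dp(pos, rem, tight, started) of A, recursing on the suffix of str(N) from pos (the suffix
-- length identifies pos); the inner `for d in range(0, limit+1)` with its early `break` is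
-- pvDpALoopM.  @lru_cache is ported faithfully: `cache` maps the argument tuple to the
-- memoised result and is threaded through the recursion (dp.cache_clear() after the final
-- call does not affect the returned value).
mutual
def pvDpAM (s : List Char) (rem : Int) (tight started : Bool)
    (cache : Std.HashMap (Nat × Int × Bool × Bool) Int) :
    Int × Std.HashMap (Nat × Int × Bool × Bool) Int :=
  match cache[(s.length, rem, tight, started)]? with
  | some v => (v, cache)
  | none =>
    let r : Int × Std.HashMap (Nat × Int × Bool × Bool) Int :=
      match s with
      | [] => ((if rem < 0 then 0 else if started && rem == 0 then 1 else 0 : Int), cache)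
      | c :: rest =>
        if rem < 0 then (0, cache)
        else pvDpALoopM rest (if tight then pvIntOfChar c else 9) rem tight started 0 cache
    (r.1, r.2.insert (s.length, rem, tight, started) r.1)
termination_by (s.length + 1, 0)

def pvDpALoopM (rest : List Char) (limit rem : Int) (tight started : Bool) (d : Nat)
    (cache : Std.HashMap (Nat × Int × Bool × Bool) Int) :
    Int × Std.HashMap (Nat × Int × Bool × Bool) Int :=
  if _h : (d : Int) ≤ limit then
    let new_started := started || decide (0 < (d : Int))
    let new_rem := if new_started then rem - (d : Int) else rem
    if new_rem < 0 then (0, cache)   -- `break`: the remaining iterations contribute nothing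
    else
      let r1 := pvDpAM rest new_rem (tight && decide ((d : Int) = limit)) new_started cache
      let r2 := pvDpALoopM rest limit rem tight started (d + 1) r1.2
      (r1.1 + r2.1, r2.2)
  else (0, cache)
termination_by (rest.length + 1, (limit + 1 - (d : Int)).toNat)
decreasing_by
  all_goals first
    | exact Prod.Lex.left _ _ (by omega)
    | exact Prod.Lex.right _ (by omega)
end

def count_digit_sum_eq (N : Int) (k : Int) : Int :=
  (pvDpAM (PySem.Int.toStr N).toList k true false ∅).1

-- ===== PORT B =====

-- one row step: [sum(prev[j - d] if d <= j else 0 for d in range(10)) for j in range(k + 1)]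
def pvWaysRow (prev : List Int) (k : Int) : List Int :=
  (PySem.List.pyRange 0 (k + 1)).map (fun j =>
    ((PySem.List.pyRange 0 10).map (fun d =>
      if d ≤ j then (PySem.List.pyGet? prev (j - d)).getD 0 else 0)).sum)

-- ways = [[1] + [0]*k]; for _ in range(1, n): ways.append(row built from ways[-1])
-- (`.getD` totalizes in-range indexing: ways is nonempty and prev[j-d] has 0 ≤ j-d ≤ k)
def pvBuildWays (n : Int) (k : Int) : List (List Int) :=
  (PySem.List.pyRange 1 n).foldl
    (fun ways _ => ways ++ [pvWaysRow ((PySem.List.pyGet? ways (-1)).getD []) k])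
    [1 :: List.replicate k.toNat 0]

-- def w(i, j): return ways[i][j] if 0 <= j <= k else 0
def pvW (ways : List (List Int)) (k : Int) (i j : Int) : Int :=
  if 0 ≤ j ∧ j ≤ k then (PySem.List.pyGet? ((PySem.List.pyGet? ways i).getD []) j).getD 0 else 0

def count_digit_sum_eq_alt (N : Int) (k : Int) : Int :=
  let digits := (PySem.Int.toStr N).toList.map pvIntOfChar
  let n : Int := digits.length
  if k < 0 ∨ 9 * n < k then 0
  else
    let ways := pvBuildWays n k
    -- numbers with fewer digits than N
    let count1 := (PySem.List.pyRange 1 n).foldl (fun cnt L =>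
        (PySem.List.pyRange 1 10).foldl (fun c d => c + pvW ways k (L - 1) (k - d)) cnt) 0
    -- numbers with exactly n digits, smaller than N; state = (count, placed)
    let st := (PySem.List.enumerate digits).foldl (fun (st : Int × Int) pd =>
        ((PySem.List.pyRange (if pd.1 == 0 then 1 else 0) pd.2).foldl
            (fun c d => c + pvW ways k (n - 1 - pd.1) (k - st.2 - d)) st.1,
         st.2 + pd.2)) (count1, 0)
    -- N itself (a positive number: digit sum > 0)
    if st.2 == k && 0 < st.2 then st.1 + 1 else st.1

-- ===== PRECONDITION & SPEC =====
-- Pre_ excludes N < 0 only: there str(N) starts with '-', so A raises ValueError at int('-')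
-- whenever the digit loop is reached (k ≥ 0); for k < 0 A happens to return 0 before touching
-- the digits, an accident of evaluation order that B (which converts all digits first, and
-- raises) does not reproduce — negative N is outside the function's [1..N] counting domain.
def Pre_count_digit_sum_eq (N : Int) (k : Int) : Prop := 0 ≤ N
instance (N : Int) (k : Int) : Decidable (Pre_count_digit_sum_eq N k) := by unfold Pre_count_digit_sum_eq; infer_instance
def pvWitness_count_digit_sum_eq : Int × Int := (100, 5)

def Spec_count_digit_sum_eq (N : Int) (k : Int) (out : Int) : Prop := out = count_digit_sum_eq_alt N k
instance (N : Int) (k : Int) (out : Int) : Decidable (Spec_count_digit_sum_eq N k out) := by unfold Spec_count_digit_sum_eq; infer_instance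

-- ===== CLAIM (what is proved, stated in full; the proofs are below) =====
def Claim_equal_count_digit_sum_eq : Prop := ∀ (N : Int) (k : Int), Dom_count_digit_sum_eq N k → Pre_count_digit_sum_eq N k → Spec_count_digit_sum_eq N k (count_digit_sum_eq N k)


-- ===== LEMMAS AND PROOFS =====

-- proof-side version of A's dp without the memo table (same recursion, value only)
mutual
def pvDpA (s : List Char) (rem : Int) (tight started : Bool) : Int :=
  match s with
  | [] => if rem < 0 then 0 else if started && rem == 0 then 1 else 0
  | c :: rest =>
    if rem < 0 then 0
    else pvDpALoop rest (if tight then pvIntOfChar c else 9) rem tight started 0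
termination_by (s.length + 1, 0)

def pvDpALoop (rest : List Char) (limit rem : Int) (tight started : Bool) (d : Nat) : Int :=
  if _h : (d : Int) ≤ limit then
    let new_started := started || decide (0 < (d : Int))
    let new_rem := if new_started then rem - (d : Int) else rem
    if new_rem < 0 then 0
    else pvDpA rest new_rem (tight && decide ((d : Int) = limit)) new_started
         + pvDpALoop rest limit rem tight started (d + 1)
  else 0
termination_by (rest.length + 1, (limit + 1 - (d : Int)).toNat)
decreasing_by
  all_goals first
    | exact Prod.Lex.left _ _ (by omega)
    | exact Prod.Lex.right _ (by omega)
end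

-- every entry of the memo table is the value of the memo-free dp on the suffix of s0
-- of the recorded length
def pvGoodCache (s0 : List Char) (cache : Std.HashMap (Nat × Int × Bool × Bool) Int) : Prop :=
  ∀ (n : Nat) (rem : Int) (t st : Bool) (v : Int),
    cache[(n, rem, t, st)]? = some v → v = pvDpA (s0.drop (s0.length - n)) rem t st

mutual
theorem pvDpAM_correct (s0 s : List Char) (hlen : s.length ≤ s0.length)
    (hsuf : s0.drop (s0.length - s.length) = s) (rem : Int) (t st : Bool)
    (cache : Std.HashMap (Nat × Int × Bool × Bool) Int) (hg : pvGoodCache s0 cache) :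
    (pvDpAM s rem t st cache).1 = pvDpA s rem t st ∧
      pvGoodCache s0 (pvDpAM s rem t st cache).2 := by
  have hmain : ∀ (r : Int × Std.HashMap (Nat × Int × Bool × Bool) Int),
      r.1 = pvDpA s rem t st → pvGoodCache s0 r.2 →
      ((r.1, r.2.insert (s.length, rem, t, st) r.1).1 = pvDpA s rem t st ∧
        pvGoodCache s0 (r.1, r.2.insert (s.length, rem, t, st) r.1).2) := by
    intro r hr hgr
    refine ⟨hr, ?_⟩
    intro n rem' t' st' v hv
    rw [Std.HashMap.getElem?_insert] at hv
    by_cases hk : ((s.length, rem, t, st) : Nat × Int × Bool × Bool) = (n, rem', t', st')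
    · rw [if_pos (by simp [hk]), Option.some_inj] at hv
      obtain ⟨h1, h2, h3, h4⟩ : s.length = n ∧ rem = rem' ∧ t = t' ∧ st = st' := by
        simpa [Prod.ext_iff] using hk
      rw [← hv, ← h1, ← h2, ← h3, ← h4, hsuf]
      exact hr
    · rw [if_neg (by simpa using hk)] at hv
      exact hgr _ _ _ _ _ hv
  rw [pvDpAM.eq_def]
  cases hc : cache[(s.length, rem, t, st)]? with
  | some v =>
      refine ⟨?_, hg⟩
      rw [← hsuf]
      exact hg _ _ _ _ _ hc
  | none =>
      cases s with
      | nil =>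
          exact hmain ((if rem < 0 then 0 else if st && rem == 0 then 1 else 0 : Int), cache)
            (by rw [pvDpA]) hg
      | cons c rest =>
          dsimp only
          by_cases hneg : rem < 0
          · rw [if_pos hneg]
            exact hmain ((0 : Int), cache) (by rw [pvDpA, if_pos hneg]) hg
          · have hsufr : s0.drop (s0.length - rest.length) = rest := by
              have h2 : s0.length - rest.length = (s0.length - (c :: rest).length) + 1 := by
                simp only [List.length_cons] at hlen ⊢
                omega
              rw [h2, ← List.drop_drop, hsuf]
              rfl
            have hres := pvDpALoopM_correct s0 rest
              (by simp only [List.length_cons] at hlen; omega) hsufr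
              (if t then pvIntOfChar c else 9) rem t st 0 cache hg
            rw [if_neg hneg]
            exact hmain (pvDpALoopM rest (if t then pvIntOfChar c else 9) rem t st 0 cache)
              (by rw [pvDpA, if_neg hneg]; exact hres.1) hres.2
termination_by (s.length + 1, 0)

theorem pvDpALoopM_correct (s0 rest : List Char) (hlen : rest.length ≤ s0.length)
    (hsuf : s0.drop (s0.length - rest.length) = rest) (limit rem : Int) (tight started : Bool)
    (d : Nat) (cache : Std.HashMap (Nat × Int × Bool × Bool) Int) (hg : pvGoodCache s0 cache) :
    (pvDpALoopM rest limit rem tight started d cache).1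
        = pvDpALoop rest limit rem tight started d ∧
      pvGoodCache s0 (pvDpALoopM rest limit rem tight started d cache).2 := by
  rw [pvDpALoopM.eq_def, pvDpALoop.eq_def]
  by_cases hd : (d : Int) ≤ limit
  · rw [dif_pos hd, dif_pos hd]
    by_cases hbr : (if (started || decide (0 < (d : Int))) then rem - (d : Int) else rem) < 0
    · simp only [if_pos hbr]
      exact ⟨by trivial, hg⟩
    · simp only [if_neg hbr]
      have h1 := pvDpAM_correct s0 rest hlen hsuf
        (if (started || decide (0 < (d : Int))) then rem - (d : Int) else rem)
        (tight && decide ((d : Int) = limit)) (started || decide (0 < (d : Int))) cache hg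
      have h2 := pvDpALoopM_correct s0 rest hlen hsuf limit rem tight started (d + 1)
        (pvDpAM rest (if (started || decide (0 < (d : Int))) then rem - (d : Int) else rem)
          (tight && decide ((d : Int) = limit)) (started || decide (0 < (d : Int))) cache).2
        h1.2
      exact ⟨by rw [h1.1, h2.1], h2.2⟩
  · rw [dif_neg hd, dif_neg hd]
    exact ⟨by trivial, hg⟩
termination_by (rest.length + 1, (limit + 1 - (d : Int)).toNat)
decreasing_by
  all_goals first
    | exact Prod.Lex.left _ _ (by omega)
    | exact Prod.Lex.right _ (by omega)
end

lemma pvA_eval (N k : Int) :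
    count_digit_sum_eq N k = pvDpA (PySem.Int.toStr N).toList k true false := by
  refine (pvDpAM_correct ((PySem.Int.toStr N).toList) ((PySem.Int.toStr N).toList)
    le_rfl (by simp) k true false ∅ ?_).1
  intro n rem t st v hv
  rw [Std.HashMap.getElem?_empty] at hv
  exact absurd hv (by simp)


-- F n r = number of n-digit strings over 0..9 with digit sum r (the dp with tight and
-- started both irrelevant); S ds r = the strictly-smaller part of the tight scan;
-- T adds the "equal to the remaining digits" case; G m r = numbers of 1..m digits
-- (first digit nonzero) with digit sum r.
def pvF : Nat → Int → Int
  | 0, r => if r = 0 then 1 else 0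
  | n + 1, r => ((List.range 10).map (fun (d : Nat) => pvF n (r - (d : Int)))).sum

def pvS : List Int → Int → Int
  | [], _ => 0
  | c :: t, r => ((List.range c.toNat).map (fun (d : Nat) => pvF t.length (r - (d : Int)))).sum + pvS t (r - c)

def pvT (ds : List Int) (r : Int) : Int := pvS ds r + (if r = ds.sum then 1 else 0)

def pvG : Nat → Int → Int
  | 0, _ => 0
  | m + 1, r => pvG m r + ((List.range 9).map (fun (d : Nat) => pvF m (r - ((d : Int) + 1)))).sum

lemma pvF_neg (n : Nat) : ∀ r : Int, r < 0 → pvF n r = 0 := by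
  induction n with
  | zero => intro r h; simp [pvF]; omega
  | succ n ih =>
      intro r h
      simp only [pvF]
      refine List.sum_eq_zero ?_
      intro x hx
      simp only [List.mem_map] at hx
      obtain ⟨d, hd, rfl⟩ := hx
      exact ih (r - d) (by omega)
lemma pvF_big (n : Nat) : ∀ r : Int, 9 * n < r → pvF n r = 0 := by
  induction n with
  | zero => intro r h; simp at h; simp [pvF]; omega
  | succ n ih =>
      intro r h
      simp only [pvF]
      refine List.sum_eq_zero ?_
      intro x hx
      simp only [List.mem_map] at hx
      obtain ⟨d, hd, rfl⟩ := hx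
      simp only [List.mem_range] at hd
      exact ih (r - d) (by push_cast at h ⊢; omega)
lemma pvG_neg (m : Nat) (r : Int) (h : r < 0) : pvG m r = 0 := by
  induction m with
  | zero => simp [pvG]
  | succ m ih =>
      have h2 : ((List.range 9).map (fun (d : Nat) => pvF m (r - ((d : Int) + 1)))).sum = 0 := by
        refine List.sum_eq_zero ?_
        intro x hx
        simp only [List.mem_map] at hx
        obtain ⟨d, hd, rfl⟩ := hx
        exact pvF_neg m (r - ((d : Int) + 1)) (by omega)
      simp [pvG, ih, h2]
lemma pvG_big (m : Nat) (r : Int) (h : 9 * m < r) : pvG m r = 0 := by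
  induction m with
  | zero => simp [pvG]
  | succ m ih =>
      have hm : 9 * (m:Int) < r := by push_cast at h ⊢; omega
      have h2 : ((List.range 9).map (fun (d : Nat) => pvF m (r - ((d : Int) + 1)))).sum = 0 := by
        refine List.sum_eq_zero ?_
        intro x hx
        simp only [List.mem_map] at hx
        obtain ⟨d, hd, rfl⟩ := hx
        simp only [List.mem_range] at hd
        exact pvF_big m (r - ((d : Int) + 1)) (by push_cast; omega)
      simp [pvG, ih (by omega), h2]
lemma pvS_neg (ds : List Int) : ∀ r : Int, (∀ x ∈ ds, 0 ≤ x) → r < 0 → pvS ds r = 0 := by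
  induction ds with
  | nil => intro r _ _; simp [pvS]
  | cons c t ih =>
      intro r hx hr
      have hc : 0 ≤ c := hx c (by simp)
      have h2 : ((List.range c.toNat).map (fun (d : Nat) => pvF t.length (r - (d : Int)))).sum = 0 := by
        refine List.sum_eq_zero ?_
        intro x hmx
        simp only [List.mem_map] at hmx
        obtain ⟨d, hd, rfl⟩ := hmx
        exact pvF_neg t.length (r - d) (by omega)
      simp [pvS, h2, ih (r - c) (fun x hxm => hx x (by simp [hxm])) (by omega)]
lemma pvT_neg (ds : List Int) (r : Int) (h : ∀ x ∈ ds, 0 ≤ x) (hr : r < 0) : pvT ds r = 0 := by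
  have hs : 0 ≤ ds.sum := List.sum_nonneg h
  simp only [pvT]
  rw [pvS_neg ds r h hr, if_neg (by omega)]
  norm_num
lemma pvS_big (ds : List Int) : ∀ r : Int, (∀ x ∈ ds, 0 ≤ x ∧ x ≤ 9) → 9 * ds.length < r →
    pvS ds r = 0 := by
  induction ds with
  | nil => intro r _ _; simp [pvS]
  | cons c t ih =>
      intro r h hr
      have hc := h c (by simp)
      simp only [List.length_cons] at hr
      have hrt : 9 * (t.length : Int) < r - c := by push_cast at hr ⊢; omega
      have h2 : ((List.range c.toNat).map (fun (d : Nat) => pvF t.length (r - (d : Int)))).sum = 0 := by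
        refine List.sum_eq_zero ?_
        intro x hmx
        simp only [List.mem_map] at hmx
        obtain ⟨d, hd, rfl⟩ := hmx
        simp only [List.mem_range] at hd
        exact pvF_big t.length (r - d) (by push_cast at hr ⊢; omega)
      simp [pvS, h2, ih (r - c) (fun x hx => h x (by simp [hx])) hrt]

lemma pvSum_le (ds : List Int) (h : ∀ x ∈ ds, 0 ≤ x ∧ x ≤ 9) : ds.sum ≤ 9 * ds.length := by
  induction ds with
  | nil => simp
  | cons c t ih =>
      have hc := h c (by simp)
      have ht := ih (fun x hx => h x (by simp [hx]))
      simp only [List.sum_cons, List.length_cons]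
      push_cast at ht ⊢
      omega

lemma pvT_big (ds : List Int) (r : Int) (h : ∀ x ∈ ds, 0 ≤ x ∧ x ≤ 9) (hr : 9 * ds.length < r) :
    pvT ds r = 0 := by
  have hs : ds.sum ≤ 9 * ds.length := pvSum_le ds h
  simp only [pvT]
  rw [pvS_big ds r h hr, if_neg (by omega)]
  norm_num
lemma pvT_cons (c : Int) (t : List Int) (r : Int) :
    pvT (c :: t) r
      = ((List.range c.toNat).map (fun (d : Nat) => pvF t.length (r - (d : Int)))).sum
        + pvT t (r - c) := by
  have hiff : (r = (c :: t).sum) ↔ (r - c = t.sum) := by simp only [List.sum_cons]; omega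
  simp only [pvT, pvS]
  rw [if_congr hiff rfl rfl]
  ring
lemma pvG_eq_sum (m : Nat) (r : Int) :
    pvG m r
      = ((List.range m).map (fun (t : Nat) =>
          ((List.range 9).map (fun (d : Nat) => pvF t (r - ((d : Int) + 1)))).sum)).sum := by
  induction m with
  | zero => simp [pvG]
  | succ m ih => simp only [pvG, ih, List.range_succ, List.map_append, List.sum_append,
      List.map_cons, List.sum_cons, List.map_nil, List.sum_nil, add_zero]

-- ---- the inner `for d in range(0, limit+1)` loop of A as a plain sum ----

def pvTerm (rest : List Char) (limit rem : Int) (tight started : Bool) (j : Nat) : Int :=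
  let ns := started || decide (0 < (j : Int))
  let nr := if ns then rem - (j : Int) else rem
  if nr < 0 then 0 else pvDpA rest nr (tight && decide ((j : Int) = limit)) ns

lemma pvDpALoop_eq (rest : List Char) (limit rem : Int) (tight started : Bool) :
    ∀ (m : Nat) (d : Nat), (limit + 1 - (d : Int)).toNat = m →
      pvDpALoop rest limit rem tight started d
        = ((List.range m).map (fun i => pvTerm rest limit rem tight started (d + i))).sum := by
  intro m
  induction m with
  | zero =>
      intro d hd
      rw [pvDpALoop, dif_neg (by omega)]
      simp
  | succ m ih =>
      intro d hd
      have hdl : (d : Int) ≤ limit := by omega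
      have hm : (limit + 1 - ((d + 1 : Nat) : Int)).toNat = m := by push_cast at hd ⊢; omega
      rw [pvDpALoop, dif_pos hdl]
      show (if (if (started || decide (0 < (d : Int))) then rem - (d : Int) else rem) < 0 then 0
        else pvDpA rest (if (started || decide (0 < (d : Int))) then rem - (d : Int) else rem)
               (tight && decide ((d : Int) = limit)) (started || decide (0 < (d : Int)))
             + pvDpALoop rest limit rem tight started (d + 1)) = _
      by_cases hbr : (if (started || decide (0 < (d : Int))) then rem - (d : Int) else rem) < 0
      · rw [if_pos hbr]
        symm
        refine List.sum_eq_zero ?_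
        intro x hx
        simp only [List.mem_map] at hx
        obtain ⟨i, hi, rfl⟩ := hx
        simp only [pvTerm]
        rw [if_pos ?_]
        by_cases hst : started
        · simp only [hst, Bool.true_or, if_true] at hbr ⊢
          push_cast; omega
        · simp only [hst, Bool.false_or] at hbr ⊢
          by_cases hd0 : 0 < (d : Int)
          · have hdi : 0 < ((d + i : Nat) : Int) := by push_cast; omega
            simp only [hd0, decide_true, if_true] at hbr
            simp only [hdi, decide_true, if_true]
            push_cast at hbr ⊢; omega
          · simp only [hd0, decide_false, if_false] at hbr
            split
            · push_cast; omega
            · exact hbr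
      · rw [if_neg hbr]
        rw [ih (d + 1) hm, List.range_succ_eq_map]
        simp only [List.map_cons, List.sum_cons, List.map_map]
        have h0 : pvTerm rest limit rem tight started (d + 0)
            = pvDpA rest (if (started || decide (0 < (d : Int))) then rem - (d : Int) else rem)
                (tight && decide ((d : Int) = limit)) (started || decide (0 < (d : Int))) := by
          simp only [pvTerm, Nat.add_zero]
          rw [if_neg hbr]
        rw [h0]
        congr 1
        refine congrArg List.sum (List.map_congr_left ?_)
        intro i _
        show pvTerm rest limit rem tight started ((d + 1) + i)
          = ((fun i => pvTerm rest limit rem tight started (d + i)) ∘ Nat.succ) i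
        simp only [Function.comp_apply]
        congr 1
        omega

-- ---- digit characters ----

def pvDigitChars : List Char := ['0', '1', '2', '3', '4', '5', '6', '7', '8', '9']

lemma pvIntOfChar_bounds (c : Char) (h : c ∈ pvDigitChars) :
    0 ≤ pvIntOfChar c ∧ pvIntOfChar c ≤ 9 := by
  fin_cases h <;> decide

lemma pvIntOfChar_pos (c : Char) (h : c ∈ pvDigitChars) (h0 : c ≠ '0') : 1 ≤ pvIntOfChar c := by
  fin_cases h
  · exact absurd rfl h0
  all_goals decide

lemma pvToDigitsCore_mem (P : Char → Prop) (hP : ∀ m : Nat, m < 10 → P (Nat.digitChar m)) :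
    ∀ (fuel n : Nat) (acc : List Char), (∀ c ∈ acc, P c) →
      ∀ c ∈ Nat.toDigitsCore 10 fuel n acc, P c := by
  intro fuel
  induction fuel with
  | zero => intro n acc hacc c hc; simpa [Nat.toDigitsCore] using hacc c (by simpa [Nat.toDigitsCore] using hc)
  | succ fuel ih =>
      intro n acc hacc c hc
      have hmod : n % 10 < 10 := Nat.mod_lt _ (by norm_num)
      simp only [Nat.toDigitsCore] at hc
      by_cases h10 : n / 10 = 0
      · rw [if_pos h10] at hc
        rcases List.mem_cons.1 hc with h | h
        · subst h; exact hP _ hmod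
        · exact hacc _ h
      · rw [if_neg h10] at hc
        refine ih (n / 10) _ ?_ c hc
        intro x hx
        rcases List.mem_cons.1 hx with h | h
        · subst h; exact hP _ hmod
        · exact hacc _ h

lemma pvToChars_digits (N : Int) (h : 0 ≤ N) :
    ∀ c ∈ (PySem.Int.toStr N).toList, c ∈ pvDigitChars := by
  intro c hc
  rw [PySem.Int.toList_toStr] at hc
  simp only [PySem.Int.toChars, if_neg (by omega : ¬ N < 0)] at hc
  refine pvToDigitsCore_mem (· ∈ pvDigitChars) ?_ _ _ [] (by simp) c hc
  intro m hm
  interval_cases m <;> decide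

lemma pvToDigitsCore_head :
    ∀ (fuel n : Nat) (acc : List Char), 1 ≤ n → n < 10 ^ fuel →
      ∃ c rest, Nat.toDigitsCore 10 fuel n acc = c :: rest ∧ c ∈ pvDigitChars ∧ c ≠ '0' := by
  intro fuel
  induction fuel with
  | zero => intro n acc h1 h2; omega
  | succ fuel ih =>
      intro n acc h1 h2
      simp only [Nat.toDigitsCore]
      by_cases h10 : n / 10 = 0
      · rw [if_pos h10]
        have hn : n < 10 := by omega
        have hmod : n % 10 = n := Nat.mod_eq_of_lt hn
        rw [hmod]
        refine ⟨_, _, rfl, ?_, ?_⟩ <;> (interval_cases n <;> decide)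
      · rw [if_neg h10]
        refine ih (n / 10) _ (by omega) ?_
        have : (10 : Nat) ^ (fuel + 1) = 10 ^ fuel * 10 := pow_succ 10 fuel
        omega

lemma pvToChars_head (N : Int) (h : 1 ≤ N) :
    ∃ c rest, (PySem.Int.toStr N).toList = c :: rest ∧ c ∈ pvDigitChars ∧ c ≠ '0' := by
  rw [PySem.Int.toList_toStr]
  simp only [PySem.Int.toChars, if_neg (by omega : ¬ N < 0)]
  have h1 : 1 ≤ N.toNat := by omega
  have h2 : N.toNat < 10 ^ (N.toNat + 1) := by
    calc N.toNat < 10 ^ N.toNat := Nat.lt_pow_self (by norm_num)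
    _ ≤ 10 ^ (N.toNat + 1) := Nat.pow_le_pow_right (by norm_num) (by omega)
  exact pvToDigitsCore_head (N.toNat + 1) N.toNat [] h1 h2

-- ---- characterization of A's dp ----

lemma pvDpA_notight_started (s : List Char) : ∀ rem : Int,
    pvDpA s rem false true = pvF s.length rem := by
  induction s with
  | nil =>
      intro rem
      by_cases h : rem < 0
      · simp only [pvDpA, if_pos h, List.length_nil, pvF]
        rw [if_neg (by omega)]
      · simp only [pvDpA, if_neg h, List.length_nil, pvF, Bool.true_and]
        simp [beq_iff_eq]
  | cons c rest ih =>
      intro rem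
      simp only [pvDpA, Bool.false_eq_true, if_false, List.length_cons]
      by_cases h : rem < 0
      · rw [if_pos h, pvF_neg _ _ h]
      · rw [if_neg h, pvDpALoop_eq rest 9 rem false true 10 0 (by decide)]
        simp only [pvF]
        refine congrArg List.sum (List.map_congr_left ?_)
        intro i hi
        simp only [pvTerm, Nat.zero_add, Bool.true_or, if_true, Bool.false_and]
        rw [ih (rem - i)]
        by_cases hneg : rem - (i : Int) < 0
        · rw [if_pos hneg, pvF_neg _ _ hneg]
        · rw [if_neg hneg]

lemma pvDpA_notight_notstarted (s : List Char) : ∀ rem : Int,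
    pvDpA s rem false false = pvG s.length rem := by
  induction s with
  | nil =>
      intro rem
      simp [pvDpA, pvG]
  | cons c rest ih =>
      intro rem
      simp only [pvDpA, Bool.false_eq_true, if_false, List.length_cons]
      by_cases h : rem < 0
      · rw [if_pos h, pvG_neg _ _ h]
      · rw [if_neg h, pvDpALoop_eq rest 9 rem false false 10 0 (by decide)]
        rw [List.range_succ_eq_map]
        simp only [List.map_cons, List.sum_cons, List.map_map]
        have h0 : pvTerm rest 9 rem false false (0 + 0) = pvG rest.length rem := by
          simp only [pvTerm, Nat.add_zero, Nat.zero_add]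
          norm_num
          rw [if_neg h, ih rem]
        have h1 : ∀ i ∈ List.range 9,
            ((fun i => pvTerm rest 9 rem false false (0 + i)) ∘ Nat.succ) i
              = pvF rest.length (rem - ((i : Int) + 1)) := by
          intro i hi
          simp only [Function.comp_apply, pvTerm, Nat.zero_add]
          have hpos : (0 : Int) < ((Nat.succ i : Nat) : Int) := by push_cast; omega
          simp only [hpos, decide_true, Bool.or_true, if_true, Bool.false_and]
          rw [pvDpA_notight_started rest]
          have hc : ((Nat.succ i : Nat) : Int) = (i : Int) + 1 := by push_cast; ring
          rw [hc]
          by_cases hneg : rem - ((i : Int) + 1) < 0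
          · rw [if_pos hneg, pvF_neg _ _ hneg]
          · rw [if_neg hneg]
        rw [h0, List.map_congr_left h1]
        simp [pvG]

lemma pvDpA_tight_started (s : List Char) (hs : ∀ c ∈ s, c ∈ pvDigitChars) : ∀ rem : Int,
    pvDpA s rem true true = pvT (s.map pvIntOfChar) rem := by
  induction s with
  | nil =>
      intro rem
      by_cases h : rem < 0
      · simp only [pvDpA, if_pos h, pvT, pvS, List.map_nil, List.sum_nil]
        rw [if_neg (by omega)]
        norm_num
      · simp only [pvDpA, if_neg h, pvT, pvS, List.map_nil, List.sum_nil, Bool.true_and]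
        simp [beq_iff_eq]
  | cons c rest ih =>
      intro rem
      have hcd : c ∈ pvDigitChars := hs c (by simp)
      have hrest : ∀ x ∈ rest, x ∈ pvDigitChars := fun x hx => hs x (by simp [hx])
      have hc := pvIntOfChar_bounds c hcd
      have hnn : ∀ x ∈ rest.map pvIntOfChar, 0 ≤ x := by
        intro x hx
        simp only [List.mem_map] at hx
        obtain ⟨a, ha, rfl⟩ := hx
        exact (pvIntOfChar_bounds a (hrest a ha)).1
      by_cases h : rem < 0
      · simp only [pvDpA, if_pos h, List.map_cons]
        rw [pvT_neg _ _ ?_ h]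
        intro x hx
        rcases List.mem_cons.1 hx with hx0 | hx1
        · subst hx0; exact hc.1
        · exact hnn x hx1
      · simp only [pvDpA, if_neg h, if_true]
        rw [pvDpALoop_eq rest (pvIntOfChar c) rem true true ((pvIntOfChar c).toNat + 1) 0
            (by omega)]
        rw [List.map_cons, pvT_cons, List.range_succ]
        simp only [List.map_append, List.sum_append, List.map_cons, List.map_nil,
          List.sum_cons, List.sum_nil, add_zero, List.length_map]
        congr 1
        · refine congrArg List.sum (List.map_congr_left ?_)
          intro i hi
          simp only [List.mem_range] at hi
          have hne : ¬(((0 + i : Nat) : Int) = pvIntOfChar c) := by push_cast; omega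
          simp only [pvTerm, Bool.true_or, if_true, hne, decide_false, Bool.and_false]
          rw [pvDpA_notight_started rest]
          have hci : ((0 + i : Nat) : Int) = (i : Int) := by push_cast; ring
          rw [hci]
          by_cases hneg : rem - (i : Int) < 0
          · rw [if_pos hneg, pvF_neg _ _ hneg]
          · rw [if_neg hneg]
        · have hceq : ((0 + (pvIntOfChar c).toNat : Nat) : Int) = pvIntOfChar c := by
            push_cast; omega
          simp only [pvTerm, Bool.true_or, if_true, hceq, decide_true, Bool.and_true]
          rw [ih hrest]
          by_cases hneg : rem - pvIntOfChar c < 0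
          · rw [if_pos hneg, pvT_neg _ _ hnn hneg]
          · rw [if_neg hneg]

lemma pvDpA_top (c : Char) (rest : List Char) (hc : c ∈ pvDigitChars) (hc0 : c ≠ '0')
    (hrest : ∀ x ∈ rest, x ∈ pvDigitChars) (rem : Int) :
    pvDpA (c :: rest) rem true false
      = pvG rest.length rem
        + ((List.range ((pvIntOfChar c).toNat - 1)).map
            (fun (i : Nat) => pvF rest.length (rem - ((i : Int) + 1)))).sum
        + pvT (rest.map pvIntOfChar) (rem - pvIntOfChar c) := by
  have hcb := pvIntOfChar_bounds c hc
  have hc1 := pvIntOfChar_pos c hc hc0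
  have hnn : ∀ x ∈ rest.map pvIntOfChar, 0 ≤ x := by
    intro x hx
    simp only [List.mem_map] at hx
    obtain ⟨a, ha, rfl⟩ := hx
    exact (pvIntOfChar_bounds a (hrest a ha)).1
  by_cases h : rem < 0
  · simp only [pvDpA, if_pos h]
    rw [pvG_neg _ _ h, pvT_neg _ _ hnn (by omega), List.sum_eq_zero, add_zero, add_zero]
    intro x hx
    simp only [List.mem_map] at hx
    obtain ⟨d, hd, rfl⟩ := hx
    exact pvF_neg _ _ (by omega)
  · obtain ⟨m, hm⟩ : ∃ m, (pvIntOfChar c).toNat = m + 1 := ⟨(pvIntOfChar c).toNat - 1, by omega⟩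
    simp only [pvDpA, if_neg h, if_true]
    rw [pvDpALoop_eq rest (pvIntOfChar c) rem true false ((pvIntOfChar c).toNat + 1) 0
        (by omega), hm]
    rw [List.range_succ]
    simp only [List.map_append, List.sum_append, List.map_cons, List.map_nil,
      List.sum_cons, List.sum_nil, add_zero]
    rw [List.range_succ_eq_map]
    simp only [List.map_cons, List.sum_cons, List.map_map]
    have h0 : pvTerm rest (pvIntOfChar c) rem true false (0 + 0) = pvG rest.length rem := by
      have hne : ((0:Int) = pvIntOfChar c) = False := by simp; omega
      simp only [pvTerm, Nat.add_zero, Nat.cast_zero, lt_irrefl, decide_false,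
        Bool.or_false, Bool.false_or, if_false, hne, Bool.and_false, sub_zero,
        Bool.false_eq_true]
      rw [if_neg h]
      exact pvDpA_notight_notstarted rest rem
    have h1 : ∀ j ∈ List.range m,
        ((fun i => pvTerm rest (pvIntOfChar c) rem true false (0 + i)) ∘ Nat.succ) j
          = pvF rest.length (rem - ((j : Int) + 1)) := by
      intro j hj
      simp only [List.mem_range] at hj
      have hpos : (0 : Int) < ((Nat.succ j : Nat) : Int) := by push_cast; omega
      have hne : (((Nat.succ j : Nat) : Int) = pvIntOfChar c) = False := by
        simp only [eq_iff_iff, iff_false]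
        push_cast; omega
      simp only [Function.comp_apply, Nat.zero_add, pvTerm, hpos, decide_true,
        Bool.or_true, if_true, hne, decide_false, Bool.and_false]
      rw [pvDpA_notight_started rest]
      have hcast : ((Nat.succ j : Nat) : Int) = (j : Int) + 1 := by push_cast; ring
      rw [hcast]
      by_cases hneg : rem - ((j : Int) + 1) < 0
      · rw [if_pos hneg, pvF_neg _ _ hneg]
      · rw [if_neg hneg]
    have h2 : pvTerm rest (pvIntOfChar c) rem true false (0 + (m + 1))
        = pvT (rest.map pvIntOfChar) (rem - pvIntOfChar c) := by
      have hceq : ((0 + (m + 1) : Nat) : Int) = pvIntOfChar c := by push_cast; omega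
      have e1 : (false || decide (0 < ((0 + (m + 1) : Nat) : Int))) = true := by
        simp only [Bool.false_or, decide_eq_true_eq]
        push_cast; omega
      have e2 : (true && decide (((0 + (m + 1) : Nat) : Int) = pvIntOfChar c)) = true := by
        rw [Bool.true_and]; exact decide_eq_true hceq
      simp only [pvTerm, e1, e2, if_true]
      rw [hceq, pvDpA_tight_started rest hrest]
      by_cases hneg : rem - pvIntOfChar c < 0
      · rw [if_pos hneg, pvT_neg _ _ hnn hneg]
      · rw [if_neg hneg]
    rw [h0, h2, List.map_congr_left h1]
    norm_num

lemma pvDpA_zero (rem : Int) : pvDpA ['0'] rem true false = 0 := by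
  have hl : pvIntOfChar '0' = 0 := by decide
  by_cases h : rem < 0 <;>
    simp [pvDpA, pvDpALoop, hl, h]

-- ---- characterization of B's table and loops ----

lemma pvPyRange_shift (a b : Int) :
    PySem.List.pyRange a b = (List.range (b - a).toNat).map (fun (t : Nat) => a + (t : Int)) := by
  by_cases h : a < b
  · simp [PySem.List.pyRange, h]
  · simp [PySem.List.pyRange, h, show (b - a).toNat = 0 by omega]

def pvRows (k : Int) (i : Nat) : List Int :=
  (PySem.List.pyRange 0 (k + 1)).map (fun j => pvF i j)

lemma pvRows_get (k : Int) (hk : 0 ≤ k) (i : Nat) (t : Int) (h0 : 0 ≤ t) (h1 : t ≤ k) :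
    (PySem.List.pyGet? (pvRows k i) t).getD 0 = pvF i t := by
  have h1 : (k + 1 : Int) = ((k.toNat + 1 : Nat) : Int) := by omega
  have h2 : t = ((t.toNat : Nat) : Int) := by omega
  have hb : PySem.List.pyGetD (pvRows k i) t 0 = (PySem.List.pyGet? (pvRows k i) t).getD 0 := by
    simp [PySem.List.pyGetD, PySem.List.pyGet?]
  rw [← hb, pvRows, h1, h2, PySem.List.pyGetD_map_pyRange (fun j => pvF i j) (k.toNat + 1)
    t.toNat 0 (by omega)]

lemma pvRow0 (k : Int) (hk : 0 ≤ k) : (1 :: List.replicate k.toNat 0) = pvRows k 0 := by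
  have h1 : (k + 1 : Int) = ((k.toNat + 1 : Nat) : Int) := by omega
  rw [pvRows, h1, PySem.List.pyRange_zero_natCast, List.map_map, List.range_succ_eq_map,
    List.map_cons, List.map_map]
  have hh : ((fun j => pvF 0 j) ∘ fun (k : Nat) => (k : Int)) 0 = 1 := by
    simp [pvF]
  rw [hh]
  congr 1
  have : ∀ t ∈ List.range k.toNat,
      (((fun j => pvF 0 j) ∘ fun (k : Nat) => (k : Int)) ∘ Nat.succ) t = (fun _ => (0:Int)) t := by
    intro t ht
    simp only [Function.comp_apply, pvF]
    rw [if_neg (by push_cast; omega)]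
  rw [List.map_congr_left this, List.map_const', List.length_range]

lemma pvWaysRow_step (k : Int) (hk : 0 ≤ k) (i : Nat) :
    pvWaysRow (pvRows k i) k = pvRows k (i + 1) := by
  unfold pvWaysRow pvRows
  refine List.map_congr_left ?_
  intro j hj
  rw [PySem.List.mem_pyRange_one] at hj
  have hj1 : 0 ≤ j ∧ j ≤ k := by omega
  rw [show (10 : Int) = ((10 : Nat) : Int) by norm_num, PySem.List.pyRange_zero_natCast,
    List.map_map]
  simp only [pvF]
  refine congrArg List.sum (List.map_congr_left ?_)
  intro d hd
  simp only [Function.comp_apply]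
  by_cases hdj : ((d : Nat) : Int) ≤ j
  · rw [if_pos hdj]
    exact pvRows_get k hk i (j - d) (by omega) (by omega)
  · rw [if_neg hdj, pvF_neg _ _ (by omega)]

lemma pvBuildWays_eq (k : Int) (hk : 0 ≤ k) (n : Int) (hn : 1 ≤ n) :
    pvBuildWays n k = (List.range n.toNat).map (pvRows k) := by
  have key : ∀ m : Nat, 1 ≤ m →
      (PySem.List.pyRange 1 (m : Int)).foldl
        (fun ways _ => ways ++ [pvWaysRow ((PySem.List.pyGet? ways (-1)).getD []) k])
        [1 :: List.replicate k.toNat 0]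
      = (List.range m).map (pvRows k) := by
    intro m
    induction m with
    | zero => intro h; omega
    | succ m ih =>
        intro _
        by_cases hm : m = 0
        · subst hm
          rw [show ((1 : Nat) : Int) = 1 by norm_num, show PySem.List.pyRange 1 1 = [] by decide]
          simp only [List.foldl_nil]
          rw [pvRow0 k hk]
          simp
        · have h1m : 1 ≤ m := by omega
          rw [show ((m + 1 : Nat) : Int) = (m : Int) + 1 by push_cast; ring,
            PySem.List.pyRange_one_succ_right (by exact_mod_cast Nat.one_le_cast.2 h1m),
            List.foldl_append, ih h1m]
          simp only [List.foldl_cons, List.foldl_nil]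
          have hlen : ((List.range m).map (pvRows k)).length = m := by simp
          have hlast : (PySem.List.pyGet? ((List.range m).map (pvRows k)) (-1)).getD []
              = pvRows k (m - 1) := by
            simp [PySem.List.pyGet?, PySem.List.pyIdx?, hlen, show -(m:Int) ≤ -1 by omega,
              show m - 1 < m by omega]
          rw [hlast, pvWaysRow_step k hk (m - 1), show m - 1 + 1 = m by omega,
            List.range_succ, List.map_append, List.map_cons, List.map_nil]
  rw [pvBuildWays, show n = ((n.toNat : Nat) : Int) by omega]
  exact key n.toNat (by omega)

lemma pvW_eq (k : Int) (hk : 0 ≤ k) (n : Int) (hn : 1 ≤ n) (i j : Int)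
    (hi0 : 0 ≤ i) (hi1 : i < n) (hj : j ≤ k) :
    pvW (pvBuildWays n k) k i j = pvF i.toNat j := by
  unfold pvW
  by_cases hj0 : 0 ≤ j
  · rw [if_pos ⟨hj0, hj⟩, pvBuildWays_eq k hk n hn]
    have hget : (PySem.List.pyGet? ((List.range n.toNat).map (pvRows k)) i).getD []
        = pvRows k i.toNat := by
      simp only [PySem.List.pyGet?, PySem.List.pyIdx?, List.length_map, List.length_range]
      rw [if_pos hi0, if_pos (by omega : i < ((n.toNat : Nat) : Int))]
      simp [List.getElem?_range, show i.toNat < n.toNat by omega]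
    rw [hget]
    exact pvRows_get k hk i.toNat j hj0 hj
  · rw [if_neg (by tauto), pvF_neg _ _ (by omega)]

lemma pvCount1_eq (k : Int) (hk : 0 ≤ k) (n : Int) (hn : 1 ≤ n) :
    (PySem.List.pyRange 1 n).foldl (fun cnt L =>
        (PySem.List.pyRange 1 10).foldl
          (fun c d => c + pvW (pvBuildWays n k) k (L - 1) (k - d)) cnt) 0
      = pvG (n.toNat - 1) k := by
  simp only [PySem.List.foldl_add]
  rw [zero_add, pvPyRange_shift 1 n, pvPyRange_shift 1 10, pvG_eq_sum]
  rw [show ((10:Int) - 1).toNat = 9 from by decide, show (n - 1).toNat = n.toNat - 1 by omega]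
  rw [List.map_map]
  refine congrArg List.sum (List.map_congr_left ?_)
  intro t ht
  simp only [List.mem_range] at ht
  simp only [Function.comp_apply, List.map_map]
  refine congrArg List.sum (List.map_congr_left ?_)
  intro u hu
  simp only [Function.comp_apply]
  rw [show (1 + (t : Int) - 1) = (t : Int) by ring]
  rw [pvW_eq k hk n hn t (k - (1 + u)) (by omega) (by omega) (by omega)]
  rw [show ((t : Int)).toNat = t by omega,
    show k - (1 + (u : Int)) = k - ((u : Int) + 1) by ring]

lemma pvScan_eq (k : Int) (hk : 0 ≤ k) (n : Int) (hn : 1 ≤ n) :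
    ∀ (ds : List Int) (pos acc placed : Int),
      (∀ x ∈ ds, 0 ≤ x ∧ x ≤ 9) → 1 ≤ pos → pos + ds.length = n → 0 ≤ placed →
      (PySem.List.enumerate ds pos).foldl (fun (st : Int × Int) pd =>
          ((PySem.List.pyRange (if pd.1 == 0 then 1 else 0) pd.2).foldl
              (fun c d => c + pvW (pvBuildWays n k) k (n - 1 - pd.1) (k - st.2 - d)) st.1,
           st.2 + pd.2)) (acc, placed)
        = (acc + pvS ds (k - placed), placed + ds.sum) := by
  intro ds
  induction ds with
  | nil =>
      intro pos acc placed _ _ _ _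
      simp [PySem.List.enumerate, pvS]
  | cons c t ih =>
      intro pos acc placed hb hpos hlen hpl
      have hc := hb c (by simp)
      have hlt : t.length + 1 + pos = n := by
        simp only [List.length_cons] at hlen; push_cast at hlen ⊢; omega
      simp only [PySem.List.enumerate, List.foldl_cons]
      have hne : (pos == (0:Int)) = false := by
        simp only [beq_eq_false_iff_ne, ne_eq]; omega
      simp only [hne, if_false, Bool.false_eq_true]
      rw [PySem.List.foldl_add]
      have hsum : ((PySem.List.pyRange 0 c).map
          (fun d => pvW (pvBuildWays n k) k (n - 1 - pos) (k - placed - d))).sum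
          = ((List.range c.toNat).map
              (fun (d : Nat) => pvF t.length ((k - placed) - (d : Int)))).sum := by
        rw [show c = ((c.toNat : Nat) : Int) by omega, PySem.List.pyRange_zero_natCast,
          List.map_map]
        refine congrArg List.sum (List.map_congr_left ?_)
        intro d hd
        simp only [Function.comp_apply]
        rw [pvW_eq k hk n hn (n - 1 - pos) (k - placed - d) (by omega) (by omega) (by omega)]
        rw [show (n - 1 - pos).toNat = t.length by omega,
          show k - placed - (d : Int) = k - placed - (d : Int) from rfl]
      rw [hsum, ih (pos + 1) _ (placed + c) (fun x hx => hb x (by simp [hx])) (by omega)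
        (by push_cast at hlen ⊢; omega) (by omega)]
      simp only [pvS, List.sum_cons, Prod.mk.injEq]
      constructor
      · rw [show k - (placed + c) = k - placed - c by ring]
        ring
      · ring

lemma pvAlt_zero (k : Int) : count_digit_sum_eq_alt 0 k = 0 := by
  have h0 : (PySem.Int.toStr 0).toList.map pvIntOfChar = [0] := by decide
  simp only [count_digit_sum_eq_alt, h0]
  norm_num


-- ===== VERDICT (by name: the statement is the Claim_ definition above) =====
set_option maxHeartbeats 1000000 in
theorem count_digit_sum_eq_spec : Claim_equal_count_digit_sum_eq := by
  intro N k _dom hpre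
  unfold Spec_count_digit_sum_eq
  have hN : 0 ≤ N := hpre
  by_cases hN0 : N = 0
  · subst hN0
    rw [pvAlt_zero k, pvA_eval]
    rw [show (PySem.Int.toStr 0).toList = ['0'] from by decide, pvDpA_zero]
  · have hN1 : 1 ≤ N := by omega
    obtain ⟨c, rest, hs, hcd, hc0⟩ := pvToChars_head N hN1
    have hall : ∀ x ∈ (PySem.Int.toStr N).toList, x ∈ pvDigitChars := pvToChars_digits N hN
    rw [hs] at hall
    have hrest : ∀ x ∈ rest, x ∈ pvDigitChars := fun x hx => hall x (by simp [hx])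
    have hcb := pvIntOfChar_bounds c hcd
    have hc1 := pvIntOfChar_pos c hcd hc0
    have hdb : ∀ x ∈ rest.map pvIntOfChar, 0 ≤ x ∧ x ≤ 9 := by
      intro x hx
      simp only [List.mem_map] at hx
      obtain ⟨a, ha, rfl⟩ := hx
      exact pvIntOfChar_bounds a (hrest a ha)
    rw [pvA_eval]
    simp only [count_digit_sum_eq_alt, hs]
    simp only [List.map_cons, List.length_cons, List.length_map, Nat.cast_add, Nat.cast_one]
    rw [pvDpA_top c rest hcd hc0 hrest k]
    have hlen9 : ((pvIntOfChar c).toNat : Int) = pvIntOfChar c := by omega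
    by_cases hkc : k < 0 ∨ 9 * ((rest.length : Int) + 1) < k
    · rw [if_pos hkc]
      have hg : pvG rest.length k = 0 := by
        rcases hkc with hneg | hbig
        · exact pvG_neg _ _ hneg
        · exact pvG_big _ _ (by omega)
      have hsum : ((List.range ((pvIntOfChar c).toNat - 1)).map
          (fun (i : Nat) => pvF rest.length (k - ((i : Int) + 1)))).sum = 0 := by
        refine List.sum_eq_zero ?_
        intro x hx
        simp only [List.mem_map] at hx
        obtain ⟨i, hi, rfl⟩ := hx
        simp only [List.mem_range] at hi
        rcases hkc with hneg | hbig
        · exact pvF_neg _ _ (by omega)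
        · exact pvF_big _ _ (by omega)
      have ht : pvT (rest.map pvIntOfChar) (k - pvIntOfChar c) = 0 := by
        rcases hkc with hneg | hbig
        · exact pvT_neg _ _ (fun x hx => (hdb x hx).1) (by omega)
        · exact pvT_big _ _ hdb (by simp only [List.length_map]; omega)
      rw [hg, hsum, ht]
      norm_num
    · rw [if_neg hkc]
      push_neg at hkc
      obtain ⟨hk0, hk9⟩ := hkc
      rw [pvCount1_eq k hk0 ((rest.length : Int) + 1) (by omega)]
      rw [show (((rest.length : Int) + 1).toNat - 1) = rest.length by omega]
      have henum : PySem.List.enumerate (pvIntOfChar c :: rest.map pvIntOfChar)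
          = (0, pvIntOfChar c) :: PySem.List.enumerate (rest.map pvIntOfChar) 1 := by
        simp [PySem.List.enumerate]
      rw [henum, List.foldl_cons]
      simp only [show ((0 : Int) == 0) = true from by decide, if_true]
      rw [PySem.List.foldl_add]
      have hfirst : ((PySem.List.pyRange 1 (pvIntOfChar c)).map
          (fun d => pvW (pvBuildWays ((rest.length : Int) + 1) k) k
            ((rest.length : Int) + 1 - 1 - (0 : Int)) (k - 0 - d))).sum
          = ((List.range ((pvIntOfChar c).toNat - 1)).map
              (fun (i : Nat) => pvF rest.length (k - ((i : Int) + 1)))).sum := by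
        rw [pvPyRange_shift 1 (pvIntOfChar c), List.map_map,
          show (pvIntOfChar c - 1).toNat = (pvIntOfChar c).toNat - 1 by omega]
        refine congrArg List.sum (List.map_congr_left ?_)
        intro i hi
        simp only [List.mem_range] at hi
        simp only [Function.comp_apply]
        rw [show ((rest.length : Int) + 1 - 1 - (0 : Int)) = (rest.length : Int) by ring]
        rw [pvW_eq k hk0 ((rest.length : Int) + 1) (by omega) (rest.length) (k - 0 - (1 + i))
          (by omega) (by omega) (by omega)]
        rw [show ((rest.length : Int)).toNat = rest.length by omega,
          show k - 0 - (1 + (i : Int)) = k - ((i : Int) + 1) by ring]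
      rw [hfirst]
      rw [pvScan_eq k hk0 ((rest.length : Int) + 1) (by omega) (rest.map pvIntOfChar) 1 _
        (0 + pvIntOfChar c) hdb (le_refl 1) (by simp only [List.length_map]; ring) (by omega)]
      have hsnn : 0 ≤ (rest.map pvIntOfChar).sum :=
        List.sum_nonneg (fun x hx => (hdb x hx).1)
      have hpos : (0 : Int) < 0 + pvIntOfChar c + (rest.map pvIntOfChar).sum := by omega
      simp only [pvT]
      by_cases heq : 0 + pvIntOfChar c + (rest.map pvIntOfChar).sum = k
      · rw [if_pos (show k - pvIntOfChar c = (rest.map pvIntOfChar).sum from by omega)]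
        rw [if_pos (show ((0 + pvIntOfChar c + (rest.map pvIntOfChar).sum == k)
            && decide (0 < 0 + pvIntOfChar c + (rest.map pvIntOfChar).sum)) = true from by
          simp only [Bool.and_eq_true, beq_iff_eq, decide_eq_true_eq]
          exact ⟨heq, hpos⟩)]
        ring
      · rw [if_neg (show ¬ (k - pvIntOfChar c = (rest.map pvIntOfChar).sum) from by omega)]
        rw [if_neg (show ¬ (((0 + pvIntOfChar c + (rest.map pvIntOfChar).sum == k)
            && decide (0 < 0 + pvIntOfChar c + (rest.map pvIntOfChar).sum)) = true) from by
          simp only [Bool.and_eq_true, beq_iff_eq, decide_eq_true_eq, not_and]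
          intro hx
          exact absurd hx heq)]
        ring
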